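-- pv_equiv track=rewrite | github.com/HaymayndzUltra/voice-assistant-prod | session_continuity_manager.py | _get_most_recent_active_task
-- ===== SOURCE A (Python) =====
-- from typing import Dict, Any, Optional, List
--
-- def _get_most_recent_active_task(tasks: List[Dict[str, Any]]) -> Optional[Dict[str, Any]]:
--     """Get the most recent active task"""
--     if not tasks:
--         return None
--
--     # Filter for in_progress tasks
--     active_tasks = [task for task in tasks if task.get('status') == 'in_progress']
--
--     if not active_tasks:
--         # If no in_progress tasks, get the most recent task
--         active_tasks = tasks
--
--     # Sort by updated timestamp (most recent first)
--     active_tasks.sort(key=lambda x: x.get('updated', ''), reverse=True)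
--
--     return active_tasks[0] if active_tasks else None
-- ===== SOURCE B (Python) =====
-- from typing import Dict, Any, Optional, List
--
-- def _get_most_recent_active_task(tasks: List[Dict[str, Any]]) -> Optional[Dict[str, Any]]:
--     """Get the most recent active task (single pass, no filtering list, no sort)."""
--     if not tasks:
--         return None
--     best_active = None
--     best_any = None
--     for task in tasks:
--         k = task.get('updated', '')
--         if best_any is None or k > best_any.get('updated', ''):
--             best_any = task
--         if task.get('status') == 'in_progress':
--             if best_active is None or k > best_active.get('updated', ''):
--                 best_active = task
--     return best_active if best_active is not None else best_any
-- ===== Notes on version B (the rewrite author's own statement) =====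
-- stated objective: simpler
-- what changed: Replaces A's build-a-filtered-list + stable reverse sort + take-head with one pass over tasks keeping two running accumulators (most recent in_progress task and most recent task overall, strict > so the first among equal timestamps wins), returning the active one if any; no intermediate list and no sort. Note: A sorts a list in place (possibly the caller's list); B mutates nothing — the equivalence is about the return value.
import Mathlib
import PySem

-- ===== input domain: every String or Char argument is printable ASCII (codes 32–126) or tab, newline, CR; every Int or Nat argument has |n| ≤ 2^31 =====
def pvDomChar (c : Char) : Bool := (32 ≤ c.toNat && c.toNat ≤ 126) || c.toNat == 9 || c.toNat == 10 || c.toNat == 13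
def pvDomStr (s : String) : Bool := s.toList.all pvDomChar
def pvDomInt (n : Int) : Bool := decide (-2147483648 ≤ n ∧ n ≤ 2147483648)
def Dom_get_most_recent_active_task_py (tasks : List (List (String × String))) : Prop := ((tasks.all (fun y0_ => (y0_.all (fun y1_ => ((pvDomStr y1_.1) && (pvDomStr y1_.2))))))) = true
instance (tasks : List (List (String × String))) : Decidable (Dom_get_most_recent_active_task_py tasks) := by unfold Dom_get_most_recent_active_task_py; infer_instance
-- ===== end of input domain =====

-- B replaces A's filter + stable reverse sort by a single pass with two running "most recent"
-- accumulators (objective: simpler / one pass, no list building or sorting). Equivalence is about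
-- the RETURN value only: A sorts a list in place (and may sort the caller's list), B mutates nothing.

-- ===== PORT A =====
def get_most_recent_active_task_py (tasks : List (List (String × String))) : Option (List (String × String)) :=
  if tasks = [] then none
  else
    -- active_tasks = [task for task in tasks if task.get('status') == 'in_progress']
    let active := tasks.filter (fun t => (PySem.Dict.mk t).get? "status" == some "in_progress")
    -- if not active_tasks: active_tasks = tasks
    let active := if active = [] then tasks else active
    -- active_tasks.sort(key=lambda x: x.get('updated', ''), reverse=True)
    let active := PySem.List.sorted active (fun t => (PySem.Dict.mk t).getD "updated" "") true
    -- return active_tasks[0] if active_tasks else None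
    if active = [] then none else active.head?

-- ===== PORT B =====
-- best = best if it is more recent than t (strict, so the first among ties wins), else t
def pvUpd (b : Option (List (String × String))) (t : List (String × String)) : Option (List (String × String)) :=
  match b with
  | none => some t
  | some h => if (PySem.Dict.mk h).getD "updated" "" < (PySem.Dict.mk t).getD "updated" "" then some t else some h

def get_most_recent_active_task_py_alt (tasks : List (List (String × String))) : Option (List (String × String)) :=
  if tasks = [] then none
  else
    let r := tasks.foldl
      (fun acc t =>
        ((if (PySem.Dict.mk t).get? "status" == some "in_progress" then pvUpd acc.1 t else acc.1),
         pvUpd acc.2 t))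
      (none, none)
    match r.1 with
    | some t => some t
    | none => r.2

-- ===== PRECONDITION & SPEC =====
def Spec_get_most_recent_active_task_py (tasks : List (List (String × String))) (out : Option (List (String × String))) : Prop := out = get_most_recent_active_task_py_alt tasks
instance (tasks : List (List (String × String))) (out : Option (List (String × String))) : Decidable (Spec_get_most_recent_active_task_py tasks out) := by unfold Spec_get_most_recent_active_task_py; infer_instance

-- ===== CLAIM (what is proved, stated in full; the proofs are below) =====
def Claim_equal_get_most_recent_active_task_py : Prop := ∀ (tasks : List (List (String × String))), Dom_get_most_recent_active_task_py tasks → Spec_get_most_recent_active_task_py tasks (get_most_recent_active_task_py tasks)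

-- ===== LEMMAS AND PROOFS =====

theorem head?_insertBy {α : Type} (bef : α → α → Bool) (x : α) (ys : List α) :
    (PySem.List.insertBy bef x ys).head? =
      (match ys.head? with
       | none => some x
       | some h => if bef x h then some x else some h) := by
  cases ys with
  | nil => rfl
  | cons h t =>
      by_cases hb : bef x h
      · simp [PySem.List.insertBy, hb]
      · simp [PySem.List.insertBy, hb]

theorem head?_foldl_insertBy {α : Type} (bef : α → α → Bool) :
    ∀ (xs : List α) (acc : List α),
      (xs.foldl (fun l x => PySem.List.insertBy bef x l) acc).head? =
        xs.foldl
          (fun b x =>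
            match b with
            | none => some x
            | some h => if bef x h then some x else some h)
          acc.head? := by
  intro xs
  induction xs with
  | nil => intro acc; rfl
  | cons x xs ih =>
      intro acc
      simp only [List.foldl_cons]
      rw [ih, head?_insertBy]

theorem head?_sorted_rev_eq_foldl_pvUpd (xs : List (List (String × String))) :
    (PySem.List.sorted xs (fun t => (PySem.Dict.mk t).getD "updated" "") true).head? =
      xs.foldl pvUpd none := by
  rw [PySem.List.sorted_rev_eq_foldl_insertBy, head?_foldl_insertBy]
  refine PySem.List.foldl_congr_mem _ _ _ _ ?_
  intro acc x _
  cases acc with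
  | none => rfl
  | some hh => simp [pvUpd]

theorem foldl_pvUpd_some_isSome :
    ∀ (l : List (List (String × String))) (a : List (String × String)),
      (l.foldl pvUpd (some a)).isSome := by
  intro l
  induction l with
  | nil => intro a; rfl
  | cons x xs ih =>
      intro a
      simp only [List.foldl_cons, pvUpd]
      split
      · exact ih x
      · exact ih a

theorem get_most_recent_active_task_py_spec : Claim_equal_get_most_recent_active_task_py := by
  intro tasks _
  unfold Spec_get_most_recent_active_task_py
  unfold get_most_recent_active_task_py get_most_recent_active_task_py_alt
  by_cases h : tasks = []
  · simp [h]
  · simp only [h, if_false]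
    rw [PySem.List.foldl_prod_mk
        (f := fun b t => if (PySem.Dict.mk t).get? "status" == some "in_progress" then pvUpd b t else b)
        (g := pvUpd)]
    rw [PySem.List.foldl_if_eq_foldl_filter]
    by_cases hf : tasks.filter (fun t => (PySem.Dict.mk t).get? "status" == some "in_progress") = []
    · -- no in_progress task: A sorts all tasks; B's active accumulator stays none
      simp [hf, PySem.List.sorted_eq_nil_iff, h, head?_sorted_rev_eq_foldl_pvUpd]
    · -- some in_progress task: A sorts the filtered list; B's active accumulator is some
      simp only [if_neg hf]
      simp only [PySem.List.sorted_eq_nil_iff, hf, if_false, head?_sorted_rev_eq_foldl_pvUpd]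
      obtain ⟨c, l', hcl⟩ := List.exists_cons_of_ne_nil hf
      rw [hcl]
      simp only [List.foldl_cons]
      have h1 : pvUpd none c = some c := rfl
      rw [h1]
      obtain ⟨u, hu⟩ := Option.isSome_iff_exists.mp (foldl_pvUpd_some_isSome l' c)
      rw [hu]
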